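-- pv_equiv track=rewrite | github.com/IchBinJade/advent-of-code-python | 2025/day09.py | find_max_area
-- ===== SOURCE A (Python) =====
-- from itertools import combinations
-- from collections import defaultdict
--
-- def find_max_area(reds, outline_tiles):
--     # 1. Group outline by row to find min/max X per row
--     row_bounds = {}
--     rows = defaultdict(list)
--     for x, y in outline_tiles:
--         rows[y].append(x)
--
--     for y, x_list in rows.items():
--         row_bounds[y] = (min(x_list), max(x_list))
--
--     max_area = 0
--     # 2. Check pairs
--     for p1, p2 in combinations(reds, 2):
--         x1, x2 = sorted([p1[0], p2[0]])
--         y1, y2 = sorted([p1[1], p2[1]])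
--
--         is_valid = True
--         # Check every row in the rectangle
--         for y in range(y1, y2 + 1):
--             if y not in row_bounds:
--                 is_valid = False
--                 break
--
--             row_min, row_max = row_bounds[y]
--             # Does our rectangle fit inside the row's boundaries?
--             if x1 < row_min or x2 > row_max:
--                 is_valid = False
--                 break
--
--         if is_valid:
--             area = (x2 - x1 + 1) * (y2 - y1 + 1)
--             if area > max_area:
--                 max_area = area
--
--     return max_area
-- ===== SOURCE B (Python) =====
-- def find_max_area(reds, outline_tiles):
--     # Row bounds in one pass: y -> (min x, max x), updated incrementally.
--     bounds = {}
--     for x, y in outline_tiles: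
--         b = bounds.get(y)
--         if b is None:
--             bounds[y] = (x, x)
--         else:
--             bounds[y] = (x if x < b[0] else b[0], x if x > b[1] else b[1])
--     # Sort reds by y; for each base point, sweep the others upward, extending
--     # the covered row interval incrementally (aggregates: max of row mins,
--     # min of row maxes) instead of rescanning it for every pair.
--     srt = sorted(reds, key=lambda p: p[1])
--     best = 0
--     n = len(srt)
--     for a in range(n):
--         xa, ya = srt[a]
--         b0 = bounds.get(ya)
--         if b0 is None:
--             continue
--         curL, curR = b0
--         prev = ya
--         for xb, yb in srt[a + 1:]:
--             broke = False
--             while prev < yb: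
--                 prev += 1
--                 r = bounds.get(prev)
--                 if r is None:
--                     broke = True
--                     break
--                 if r[0] > curL:
--                     curL = r[0]
--                 if r[1] < curR:
--                     curR = r[1]
--             if broke:
--                 break
--             x1, x2 = (xa, xb) if xa <= xb else (xb, xa)
--             if curL <= x1 and x2 <= curR:
--                 area = (x2 - x1 + 1) * (yb - ya + 1)
--                 if area > best:
--                     best = area
--     return best
-- ===== Notes on version B (the rewrite author's own statement) =====
-- stated objective: faster
-- what changed: Instead of rescanning every row of the candidate rectangle for each of the O(N^2) red pairs, B builds the per-row (min x, max x) bounds in one incremental pass and then, for each base red point in y-sorted order, sweeps the remaining points upward while extending the covered row interval and its aggregates (max of row minima, min of row maxima) incrementally, so each pair is checked in O(1) beyond extension work shared by all pairs of that base point (and the sweep stops for good once a missing row is hit).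
import Mathlib
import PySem

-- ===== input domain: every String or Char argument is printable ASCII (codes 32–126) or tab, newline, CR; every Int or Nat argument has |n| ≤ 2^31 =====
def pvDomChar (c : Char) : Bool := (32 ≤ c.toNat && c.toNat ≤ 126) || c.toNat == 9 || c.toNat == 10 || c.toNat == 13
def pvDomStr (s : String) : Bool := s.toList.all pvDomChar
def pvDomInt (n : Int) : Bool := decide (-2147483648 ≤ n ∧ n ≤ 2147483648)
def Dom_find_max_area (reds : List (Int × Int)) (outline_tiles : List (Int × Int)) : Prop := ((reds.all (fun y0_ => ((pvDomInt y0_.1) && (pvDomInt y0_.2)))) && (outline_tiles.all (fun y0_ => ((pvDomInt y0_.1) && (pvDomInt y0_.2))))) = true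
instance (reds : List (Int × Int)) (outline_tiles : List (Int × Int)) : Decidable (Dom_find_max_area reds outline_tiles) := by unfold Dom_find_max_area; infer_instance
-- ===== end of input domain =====

-- B replaces A's per-pair rescan of every row of the rectangle by one sorted sweep per
-- base point that extends row aggregates (max of row minima, min of row maxima)
-- incrementally, so each pair costs O(1) beyond the shared extension work.

-- ===== PORT A =====
-- `x1, x2 = sorted([a, b])`: Python's sort of a two-element int list, exact.
def pySort2 (a b : Int) : Int × Int := if a ≤ b then (a, b) else (b, a)

-- `for y in range(y1, y2 + 1): …` with its two `break`s (a break yields is_valid = false);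
-- the range is consumed lazily, as Python's `range` is, so a `break` stops the loop at once
def aCheckRows (rb : PySem.Dict Int (Int × Int)) (x1 x2 y y2 : Int) : Bool :=
  if y ≤ y2 then
    match rb.get? y with
    | none => false
    | some b => if x1 < b.1 || x2 > b.2 then false else aCheckRows rb x1 x2 (y + 1) y2
  else true
termination_by (y2 + 1 - y).toNat
decreasing_by omega

-- rows = defaultdict(list); for x, y in outline_tiles: rows[y].append(x)
def aRows (outline_tiles : List (Int × Int)) : PySem.Dict Int (List Int) :=
  outline_tiles.foldl (fun d p => d.modify p.2 [] (fun l => l ++ [p.1])) PySem.Dict.empty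

-- row_bounds[y] = (min(x_list), max(x_list)); x_list is nonempty, so the `.getD 0` default never fires
def aRowBounds (outline_tiles : List (Int × Int)) : PySem.Dict Int (Int × Int) :=
  (aRows outline_tiles).items.foldl (fun d p =>
    d.insert p.1 ((PySem.List.min? p.2 (fun x => x)).getD 0,
                  (PySem.List.max? p.2 (fun x => x)).getD 0)) PySem.Dict.empty

def find_max_area (reds : List (Int × Int)) (outline_tiles : List (Int × Int)) : Int :=
  let row_bounds := aRowBounds outline_tiles
  (PySem.List.combinations reds 2).foldl (fun max_area c =>
    match c with
    | [p1, p2] =>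
      let (x1, x2) := pySort2 p1.1 p2.1
      let (y1, y2) := pySort2 p1.2 p2.2
      let is_valid := aCheckRows row_bounds x1 x2 y1 y2
      if is_valid then
        let area := (x2 - x1 + 1) * (y2 - y1 + 1)
        if area > max_area then area else max_area
      else max_area
    | _ => max_area) 0

-- ===== PORT B =====
-- bounds[y] = (min x, max x), maintained in one pass
def altBounds (outline_tiles : List (Int × Int)) : PySem.Dict Int (Int × Int) :=
  outline_tiles.foldl (fun d p =>
    match d.get? p.2 with
    | none => d.insert p.2 (p.1, p.1)
    | some b => d.insert p.2 ((if p.1 < b.1 then p.1 else b.1), (if p.1 > b.2 then p.1 else b.2)))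
    PySem.Dict.empty

-- the `while prev < yb` extension loop; none = `broke` (a missing row was hit)
def altExtend (bnd : PySem.Dict Int (Int × Int)) (curL curR prev yb : Int) :
    Option (Int × Int × Int) :=
  if _h : prev < yb then
    match bnd.get? (prev + 1) with
    | none => none
    | some r =>
      altExtend bnd (if r.1 > curL then r.1 else curL) (if r.2 < curR then r.2 else curR)
        (prev + 1) yb
  else some (curL, curR, prev)
termination_by (yb - prev).toNat
decreasing_by omega

-- `for xb, yb in srt[a + 1:]: …` (breaks for good once a missing row is hit)
def altInner (bnd : PySem.Dict Int (Int × Int)) (xa ya : Int) :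
    List (Int × Int) → Int → Int → Int → Int → Int
  | [], _, _, _, best => best
  | (xb, yb) :: t, curL, curR, prev, best =>
    match altExtend bnd curL curR prev yb with
    | none => best
    | some (curL', curR', prev') =>
      let (x1, x2) := if xa ≤ xb then (xa, xb) else (xb, xa)
      let best' :=
        if curL' ≤ x1 && x2 ≤ curR' then
          let area := (x2 - x1 + 1) * (yb - ya + 1)
          if area > best then area else best
        else best
      altInner bnd xa ya t curL' curR' prev' best'

-- `for a in range(n): …`
def altOuter (bnd : PySem.Dict Int (Int × Int)) : List (Int × Int) → Int → Int
  | [], best => best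
  | (xa, ya) :: t, best =>
    match bnd.get? ya with
    | none => altOuter bnd t best
    | some b0 => altOuter bnd t (altInner bnd xa ya t b0.1 b0.2 ya best)

def find_max_area_alt (reds : List (Int × Int)) (outline_tiles : List (Int × Int)) : Int :=
  altOuter (altBounds outline_tiles) (PySem.List.sorted reds (fun p => p.2) false) 0

-- ===== PRECONDITION & SPEC =====
def Spec_find_max_area (reds : List (Int × Int)) (outline_tiles : List (Int × Int)) (out : Int) : Prop := out = find_max_area_alt reds outline_tiles
instance (reds : List (Int × Int)) (outline_tiles : List (Int × Int)) (out : Int) : Decidable (Spec_find_max_area reds outline_tiles out) := by unfold Spec_find_max_area; infer_instance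

-- ===== CLAIM (what is proved, stated in full; the proofs are below) =====
def Claim_equal_find_max_area : Prop := ∀ (reds : List (Int × Int)) (outline_tiles : List (Int × Int)), Dom_find_max_area reds outline_tiles → Spec_find_max_area reds outline_tiles (find_max_area reds outline_tiles)

-- ===== LEMMAS AND PROOFS =====

-- the x-coordinates of outline tiles lying in row y, in input order
def xsAt (ot : List (Int × Int)) (y : Int) : List Int :=
  (ot.filter (fun p => p.2 == y)).map (fun p => p.1)

-- (min xs, max xs) of a possibly-empty list
def mmSpec : List Int → Option (Int × Int)
  | [] => none
  | x :: t => some (t.foldl min x, t.foldl max x)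

-- the common functional reading of both programs' row-bounds dictionaries
def lookupSpec (ot : List (Int × Int)) (y : Int) : Option (Int × Int) := mmSpec (xsAt ot y)

def Lof (f : Int → Option (Int × Int)) (y : Int) : Int := ((f y).getD (0, 0)).1
def Rof (f : Int → Option (Int × Int)) (y : Int) : Int := ((f y).getD (0, 0)).2

-- rectangle validity, read off a lookup function
def pvalid (f : Int → Option (Int × Int)) (x1 x2 y1 y2 : Int) : Bool :=
  (PySem.List.pyRange y1 (y2 + 1) 1).all (fun y =>
    match f y with
    | none => false
    | some b => !(x1 < b.1 || x2 > b.2))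

-- the contribution of one (unordered) pair of red points to the maximum
def pg (f : Int → Option (Int × Int)) (pq : (Int × Int) × (Int × Int)) : Int :=
  let x1 := min pq.1.1 pq.2.1
  let x2 := max pq.1.1 pq.2.1
  let y1 := min pq.1.2 pq.2.2
  let y2 := max pq.1.2 pq.2.2
  if pvalid f x1 x2 y1 y2 then (x2 - x1 + 1) * (y2 - y1 + 1) else 0

-- combinations(l, 2) as a list of pairs
def pairCombos {α : Type} : List α → List (α × α)
  | [] => []
  | x :: t => t.map (fun y => (x, y)) ++ pairCombos t

theorem pySort2_eq (a b : Int) : pySort2 a b = (min a b, max a b) := by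
  unfold pySort2
  split_ifs with h
  · rw [min_eq_left h, max_eq_right h]
  · rw [min_eq_right (by omega), max_eq_left (by omega)]

theorem push_eq_max (m area : Int) (v : Bool) (hm : 0 ≤ m) (_ha : 0 < area) :
    (if v then (if area > m then area else m) else m) = max m (if v then area else 0) := by
  cases v <;> simp <;> (try split_ifs) <;> omega

theorem fold_max_nonneg {α : Type} (g : α → Int) (l : List α)
    (m : Int) (hm : 0 ≤ m) : 0 ≤ l.foldl (fun m q => max m (g q)) m :=
  le_trans hm (PySem.List.le_foldl_max_int l g m).1

theorem fold_max_zero {α : Type} (g : α → Int) (l : List α)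
    (m : Int) (hm : 0 ≤ m) (h : ∀ q ∈ l, g q = 0) :
    l.foldl (fun m q => max m (g q)) m = m := by
  induction l generalizing m with
  | nil => rfl
  | cons q t ih =>
    simp only [List.foldl_cons, h q (by simp)]
    rw [max_eq_left hm]
    exact ih m hm (fun q hq => h q (by simp [hq]))

theorem foldl_max_le_iff (l : List Int) (a c : Int) :
    l.foldl max a ≤ c ↔ a ≤ c ∧ ∀ x ∈ l, x ≤ c := by
  constructor
  · intro h
    obtain ⟨h1, h2⟩ := PySem.List.le_foldl_max (κ := Int) l a
    exact ⟨le_trans h1 h, fun x hx => le_trans (h2 x hx) h⟩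
  · rintro ⟨h1, h2⟩
    rcases PySem.List.foldl_max_mem (κ := Int) l a with h | h
    · rwa [h]
    · exact h2 _ h

theorem le_foldl_min_iff (l : List Int) (a c : Int) :
    c ≤ l.foldl min a ↔ c ≤ a ∧ ∀ x ∈ l, c ≤ x := by
  constructor
  · intro h
    obtain ⟨h1, h2⟩ := PySem.List.foldl_min_le (κ := Int) l a
    exact ⟨le_trans h h1, fun x hx => le_trans h (h2 x hx)⟩
  · rintro ⟨h1, h2⟩
    rcases PySem.List.foldl_min_mem (κ := Int) l a with h | h
    · rwa [h]
    · exact h2 _ h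

-- ===== A-side =====

theorem aCheckRows_eq_all (rb : PySem.Dict Int (Int × Int)) (x1 x2 : Int) (y2 : Int) :
    ∀ y, aCheckRows rb x1 x2 y y2 = (PySem.List.pyRange y (y2 + 1) 1).all (fun y =>
      match rb.get? y with
      | none => false
      | some b => !(x1 < b.1 || x2 > b.2)) := by
  have main : ∀ (n : Nat) (y : Int), (y2 + 1 - y).toNat ≤ n →
      aCheckRows rb x1 x2 y y2 = (PySem.List.pyRange y (y2 + 1) 1).all (fun y =>
        match rb.get? y with
        | none => false
        | some b => !(x1 < b.1 || x2 > b.2)) := by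
    intro n
    induction n with
    | zero =>
      intro y hn
      rw [aCheckRows, if_neg (by omega : ¬ y ≤ y2),
        PySem.List.pyRange_one_eq_nil (by omega : y2 + 1 ≤ y)]
      rfl
    | succ n ih =>
      intro y hn
      by_cases h : y ≤ y2
      · rw [aCheckRows, if_pos h, PySem.List.pyRange_one_cons (by omega : y < y2 + 1),
          List.all_cons]
        cases rb.get? y with
        | none => simp
        | some b =>
          by_cases hc : (x1 < b.1 || x2 > b.2) = true <;>
            simp [hc, ih (y + 1) (by omega)]
      · rw [aCheckRows, if_neg h, PySem.List.pyRange_one_eq_nil (by omega : y2 + 1 ≤ y)]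
        rfl
  intro y
  exact main (y2 + 1 - y).toNat y le_rfl

theorem combos2_foldl {α : Type} (stepL : Int → List α → Int) (step2 : Int → α × α → Int)
    (h : ∀ m a b, stepL m [a, b] = step2 m (a, b)) (xs : List α) :
    ∀ m, (PySem.List.combinations xs 2).foldl stepL m = (pairCombos xs).foldl step2 m := by
  induction xs with
  | nil => intro m; rfl
  | cons x t ih =>
    intro m
    rw [show (2 : Nat) = 1 + 1 from rfl, PySem.List.combinations_cons_succ,
      PySem.List.combinations_one]
    simp only [pairCombos, List.foldl_append, List.map_map, List.foldl_map]
    rw [ih]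
    congr 1
    apply PySem.List.foldl_congr_mem
    intro acc y _
    exact h acc x y

theorem A_fold (f : Int → Option (Int × Int)) (rb : PySem.Dict Int (Int × Int))
    (hrb : ∀ y, rb.get? y = f y) (l : List ((Int × Int) × (Int × Int))) :
    ∀ m, 0 ≤ m →
      l.foldl (fun max_area pq =>
        let (x1, x2) := pySort2 pq.1.1 pq.2.1
        let (y1, y2) := pySort2 pq.1.2 pq.2.2
        let is_valid := aCheckRows rb x1 x2 y1 y2
        if is_valid then
          let area := (x2 - x1 + 1) * (y2 - y1 + 1)
          if area > max_area then area else max_area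
        else max_area) m
      = l.foldl (fun m pq => max m (pg f pq)) m := by
  induction l with
  | nil => intro m _; rfl
  | cons pq t ih =>
    intro m hm
    simp only [List.foldl_cons, pySort2_eq]
    have hv : aCheckRows rb (min pq.1.1 pq.2.1) (max pq.1.1 pq.2.1)
        (min pq.1.2 pq.2.2) (max pq.1.2 pq.2.2)
        = pvalid f (min pq.1.1 pq.2.1) (max pq.1.1 pq.2.1) (min pq.1.2 pq.2.2)
            (max pq.1.2 pq.2.2) := by
      rw [aCheckRows_eq_all]
      unfold pvalid
      simp only [hrb]
    rw [hv]
    have harea : 0 < (max pq.1.1 pq.2.1 - min pq.1.1 pq.2.1 + 1) *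
        (max pq.1.2 pq.2.2 - min pq.1.2 pq.2.2 + 1) := mul_pos (by omega) (by omega)
    rw [push_eq_max m _ _ hm harea]
    rw [show max m (if pvalid f (min pq.1.1 pq.2.1) (max pq.1.1 pq.2.1) (min pq.1.2 pq.2.2)
          (max pq.1.2 pq.2.2) = true
        then (max pq.1.1 pq.2.1 - min pq.1.1 pq.2.1 + 1) *
          (max pq.1.2 pq.2.2 - min pq.1.2 pq.2.2 + 1) else 0) = max m (pg f pq) from rfl]
    have htail := ih (max m (pg f pq)) (le_trans hm (le_max_left _ _))
    simp only [pySort2_eq] at htail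
    exact htail

-- ===== row-bounds dictionaries =====

theorem dict_get?_eq_some_getD {κ ν : Type} [BEq κ] (d : PySem.Dict κ ν) (k : κ) (d0 : ν)
    (h : d.contains k = true) : d.get? k = some (d.getD k d0) := by
  rw [PySem.Dict.contains_eq_isSome_get?] at h
  cases hg : d.get? k with
  | none => rw [hg] at h; simp at h
  | some v => rw [PySem.Dict.getD_eq_get?_getD, hg]; rfl

theorem aRows_getD (ot : List (Int × Int)) (y : Int) :
    (aRows ot).getD y [] = xsAt ot y := by
  unfold aRows xsAt
  rw [show ot.foldl (fun d p => d.modify p.2 [] (fun l => l ++ [p.1])) PySem.Dict.empty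
      = (ot.map Prod.swap).foldl (fun d q => d.modify q.1 [] (fun l => l ++ [q.2]))
        PySem.Dict.empty from
      (List.foldl_map (f := Prod.swap)
        (g := fun (d : PySem.Dict Int (List Int)) (q : Int × Int) =>
          d.modify q.1 [] (fun l => l ++ [q.2])) (l := ot) (init := PySem.Dict.empty)).symm]
  rw [PySem.Dict.getD_foldl_modify_append]
  simp [List.filter_map, List.map_map, Function.comp_def]

theorem aRows_keys_nodup (ot : List (Int × Int)) : (aRows ot).keys.Nodup := by
  unfold aRows
  exact PySem.Dict.nodup_keys_foldl_modify_key ot (fun p => p.2) []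
    (fun _ p => fun l => l ++ [p.1]) PySem.Dict.empty PySem.Dict.nodup_keys_empty

theorem aRows_contains (ot : List (Int × Int)) (y : Int) :
    (aRows ot).contains y = true ↔ xsAt ot y ≠ [] := by
  unfold aRows xsAt
  rw [PySem.Dict.contains_iff_mem_keys,
    PySem.Dict.keys_foldl_modify_key ot (fun p => p.2) [] (fun _ p => fun l => l ++ [p.1])]
  rw [show (PySem.Dict.empty : PySem.Dict Int (List Int)).keys = [] from rfl,
    PySem.Set.update_nil_left]
  rw [PySem.Set.mem_ofList]
  simp only [ne_eq, List.map_eq_nil_iff, List.filter_eq_nil_iff, List.mem_map, beq_iff_eq]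
  constructor
  · rintro ⟨p, hp, he⟩ hnil
    exact hnil p hp he
  · intro h
    by_contra hne
    push Not at hne
    exact h (fun p hp he => hne p hp he)

theorem LA (ot : List (Int × Int)) (y : Int) :
    (aRowBounds ot).get? y = lookupSpec ot y := by
  have hnodup := aRows_keys_nodup ot
  have hkeysdef : (aRows ot).keys = (aRows ot).items.map Prod.fst := rfl
  have hitems : (aRowBounds ot).items = (aRows ot).items.map
      (fun p => (p.1, ((PySem.List.min? p.2 (fun x => x)).getD 0,
                       (PySem.List.max? p.2 (fun x => x)).getD 0))) := by
    unfold aRowBounds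
    rw [PySem.Dict.items_foldl_insert_fresh _ Prod.fst _ PySem.Dict.empty
      (fun a _ => PySem.Dict.contains_empty _) (by rw [← hkeysdef]; exact hnodup)]
    rfl
  have hrbkeys : (aRowBounds ot).keys = (aRows ot).keys := by
    rw [show (aRowBounds ot).keys = (aRowBounds ot).items.map Prod.fst from rfl, hitems,
      List.map_map, hkeysdef]
    rfl
  unfold lookupSpec
  cases hx : xsAt ot y with
  | nil =>
    have hc : ¬ (aRows ot).contains y = true := by
      rw [aRows_contains, hx]; simp
    have hyk : y ∉ (aRows ot).keys := fun hm => hc ((PySem.Dict.contains_iff_mem_keys _ _).mpr hm)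
    rw [(PySem.Dict.get?_eq_none_iff_not_mem_keys _ _).mpr (hrbkeys ▸ hyk)]
    rfl
  | cons x t =>
    have hc : (aRows ot).contains y = true := by
      rw [aRows_contains, hx]; simp
    have hg : (aRows ot).get? y = some (x :: t) := by
      rw [dict_get?_eq_some_getD _ _ [] hc, aRows_getD, hx]
    have hmem : (y, x :: t) ∈ (aRows ot).items := PySem.Dict.mem_items_of_get?_eq_some _ hg
    have hmem' : (y, ((PySem.List.min? (x :: t) (fun x => x)).getD 0,
        (PySem.List.max? (x :: t) (fun x => x)).getD 0)) ∈ (aRowBounds ot).items := by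
      rw [hitems]
      exact List.mem_map.mpr ⟨(y, x :: t), hmem, rfl⟩
    have := (PySem.Dict.get?_eq_some_iff_mem_items (aRowBounds ot) y _
      (by rw [hrbkeys]; exact hnodup)).mpr hmem'
    rw [this, PySem.List.min?_id_cons, PySem.List.max?_id_cons]
    rfl

theorem LB (ot : List (Int × Int)) (y : Int) :
    (altBounds ot).get? y = lookupSpec ot y := by
  unfold altBounds lookupSpec
  induction ot using List.reverseRecOn with
  | nil => simp [xsAt, mmSpec, PySem.Dict.get?_empty]
  | append_singleton L p ih =>
    rw [List.foldl_append, List.foldl_cons, List.foldl_nil]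
    have hxs : xsAt (L ++ [p]) y = xsAt L y ++ (if p.2 = y then [p.1] else []) := by
      unfold xsAt
      rw [List.filter_append, List.map_append]
      congr 1
      by_cases h : p.2 = y
      · simp [List.filter, h]
      · simp [h]
    by_cases hyp : y = p.2
    · subst hyp
      rw [hxs, if_pos rfl]
      cases hg : (L.foldl (fun d p =>
          match d.get? p.2 with
          | none => d.insert p.2 (p.1, p.1)
          | some b => d.insert p.2 ((if p.1 < b.1 then p.1 else b.1),
              (if p.1 > b.2 then p.1 else b.2))) PySem.Dict.empty).get? p.2 with
      | none =>
        rw [hg] at ih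
        have hxL : xsAt L p.2 = [] := by
          cases hx : xsAt L p.2 with
          | nil => rfl
          | cons a t => rw [hx] at ih; exact absurd ih.symm (by simp [mmSpec])
        rw [PySem.Dict.get?_insert_self, hxL]
        simp [mmSpec]
      | some b =>
        rw [hg] at ih
        obtain ⟨a, t, hx⟩ : ∃ a t, xsAt L p.2 = a :: t := by
          cases hx : xsAt L p.2 with
          | nil => rw [hx] at ih; exact absurd ih (by simp [mmSpec])
          | cons a t => exact ⟨a, t, rfl⟩
        rw [hx] at ih
        have hb : b = (t.foldl min a, t.foldl max a) := by
          simpa [mmSpec] using ih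
        rw [PySem.Dict.get?_insert_self, hx]
        simp only [mmSpec]
        rw [hb]
        congr 2 <;> simp [min_def, max_def] <;> omega
    · rw [hxs, if_neg (fun h => hyp h.symm), List.append_nil]
      cases hg : (L.foldl (fun d p =>
          match d.get? p.2 with
          | none => d.insert p.2 (p.1, p.1)
          | some b => d.insert p.2 ((if p.1 < b.1 then p.1 else b.1),
              (if p.1 > b.2 then p.1 else b.2))) PySem.Dict.empty).get? p.2 with
      | none => rw [PySem.Dict.get?_insert_of_ne _ _ hyp]; exact ih
      | some b => rw [PySem.Dict.get?_insert_of_ne _ _ hyp]; exact ih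

-- ===== B-side =====

theorem altExtend_some (bnd : PySem.Dict Int (Int × Int)) (yb : Int) :
    ∀ (prev curL curR : Int), prev ≤ yb →
    (∀ y, prev < y → y ≤ yb → ((bnd.get? y).isSome : Prop)) →
    altExtend bnd curL curR prev yb =
      some ((PySem.List.pyRange (prev + 1) (yb + 1) 1).foldl
              (fun m y => max m (Lof (bnd.get? ·) y)) curL,
            (PySem.List.pyRange (prev + 1) (yb + 1) 1).foldl
              (fun m y => min m (Rof (bnd.get? ·) y)) curR,
            yb) := by
  have main : ∀ (n : Nat) (prev curL curR : Int), (yb - prev).toNat ≤ n → prev ≤ yb →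
      (∀ y, prev < y → y ≤ yb → ((bnd.get? y).isSome : Prop)) →
      altExtend bnd curL curR prev yb =
        some ((PySem.List.pyRange (prev + 1) (yb + 1) 1).foldl
                (fun m y => max m (Lof (bnd.get? ·) y)) curL,
              (PySem.List.pyRange (prev + 1) (yb + 1) 1).foldl
                (fun m y => min m (Rof (bnd.get? ·) y)) curR,
              yb) := by
    intro n
    induction n with
    | zero =>
      intro prev curL curR hn hle _
      have hpe : prev = yb := by omega
      subst hpe
      rw [altExtend, dif_neg (lt_irrefl prev),
        PySem.List.pyRange_one_eq_nil (le_refl (prev + 1))]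
      rfl
    | succ n ih =>
      intro prev curL curR hn hle hp
      by_cases h : prev < yb
      · rw [altExtend, dif_pos h]
        obtain ⟨r, hr⟩ := Option.isSome_iff_exists.mp (hp (prev + 1) (by omega) (by omega))
        rw [hr]
        show altExtend bnd (if r.1 > curL then r.1 else curL)
          (if r.2 < curR then r.2 else curR) (prev + 1) yb = _
        rw [ih (prev + 1) _ _ (by omega) (by omega)
          (fun y hy1 hy2 => hp y (by omega) hy2)]
        rw [PySem.List.pyRange_one_cons (by omega : prev + 1 < yb + 1)]
        rw [List.foldl_cons, List.foldl_cons]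
        have hL : Lof (bnd.get? ·) (prev + 1) = r.1 := by simp [Lof, hr]
        have hR : Rof (bnd.get? ·) (prev + 1) = r.2 := by simp [Rof, hr]
        rw [hL, hR]
        congr 2
        · congr 1
          rw [max_def]; split_ifs <;> omega
        · congr 1
          rw [min_def]; split_ifs <;> omega
      · have hpe : prev = yb := by omega
        subst hpe
        rw [altExtend, dif_neg (lt_irrefl prev),
          PySem.List.pyRange_one_eq_nil (le_refl (prev + 1))]
        rfl
  intro prev curL curR hle hp
  exact main (yb - prev).toNat prev curL curR le_rfl hle hp

theorem altExtend_none (bnd : PySem.Dict Int (Int × Int)) (yb : Int) :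
    ∀ (prev curL curR y0 : Int), prev < y0 → y0 ≤ yb → bnd.get? y0 = none →
    altExtend bnd curL curR prev yb = none := by
  have main : ∀ (n : Nat) (prev curL curR y0 : Int), (yb - prev).toNat ≤ n → prev < y0 → y0 ≤ yb →
      bnd.get? y0 = none → altExtend bnd curL curR prev yb = none := by
    intro n
    induction n with
    | zero => intro prev curL curR y0 hn h1 h2 _; omega
    | succ n ih =>
      intro prev curL curR y0 hn h1 h2 h3
      rw [altExtend]
      rw [dif_pos (by omega : prev < yb)]
      cases hg : bnd.get? (prev + 1) with
      | none => rfl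
      | some r =>
        have hne : y0 ≠ prev + 1 := by intro he; rw [he, hg] at h3; simp at h3
        exact ih (prev + 1) _ _ y0 (by omega) (by omega) h2 h3
  intro prev curL curR y0 h1 h2 h3
  exact main (yb - prev).toNat prev curL curR y0 le_rfl h1 h2 h3

theorem pvalid_false_of_missing (f : Int → Option (Int × Int)) (x1 x2 y1 y2 y0 : Int)
    (h1 : y1 ≤ y0) (h2 : y0 ≤ y2) (h : f y0 = none) : pvalid f x1 x2 y1 y2 = false := by
  unfold pvalid
  rw [List.all_eq_false]
  exact ⟨y0, PySem.List.mem_pyRange_one.mpr ⟨h1, by omega⟩, by rw [h]; simp⟩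

theorem pg_zero_of_missing (f : Int → Option (Int × Int)) (p q : Int × Int) (y0 : Int)
    (h1 : min p.2 q.2 ≤ y0) (h2 : y0 ≤ max p.2 q.2) (h : f y0 = none) : pg f (p, q) = 0 := by
  unfold pg
  dsimp only
  rw [pvalid_false_of_missing f _ _ _ _ y0 h1 h2 h]
  simp

theorem pvalid_char (f : Int → Option (Int × Int)) (x1 x2 ya yb : Int) (hy : ya ≤ yb)
    (hp : ∀ y, ya ≤ y → y ≤ yb → ((f y).isSome : Prop)) :
    pvalid f x1 x2 ya yb =
      (decide ((PySem.List.pyRange (ya + 1) (yb + 1) 1).foldl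
          (fun m y => max m (Lof f y)) (Lof f ya) ≤ x1)
        && decide (x2 ≤ (PySem.List.pyRange (ya + 1) (yb + 1) 1).foldl
          (fun m y => min m (Rof f y)) (Rof f ya))) := by
  unfold pvalid
  rw [PySem.List.pyRange_one_cons (by omega : ya < yb + 1), List.all_cons]
  rw [show (PySem.List.pyRange (ya + 1) (yb + 1) 1).foldl (fun m y => max m (Lof f y)) (Lof f ya)
      = ((PySem.List.pyRange (ya + 1) (yb + 1) 1).map (Lof f)).foldl max (Lof f ya) from
      (List.foldl_map).symm]
  rw [show (PySem.List.pyRange (ya + 1) (yb + 1) 1).foldl (fun m y => min m (Rof f y)) (Rof f ya)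
      = ((PySem.List.pyRange (ya + 1) (yb + 1) 1).map (Rof f)).foldl min (Rof f ya) from
      (List.foldl_map).symm]
  rw [Bool.eq_iff_iff]
  simp only [Bool.and_eq_true, decide_eq_true_eq, foldl_max_le_iff, le_foldl_min_iff,
    List.all_eq_true, List.mem_map]
  have hpt : ∀ y, ya ≤ y → y ≤ yb →
      ((match f y with
        | none => false
        | some b => !(x1 < b.1 || x2 > b.2)) = true ↔ Lof f y ≤ x1 ∧ x2 ≤ Rof f y) := by
    intro y hy1 hy2
    obtain ⟨b, hb⟩ := Option.isSome_iff_exists.mp (hp y hy1 hy2)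
    rw [hb]
    simp only [Lof, Rof, hb, Option.getD_some, Bool.not_eq_true', Bool.or_eq_false_iff,
      decide_eq_false_iff_not, not_lt]
  constructor
  · rintro ⟨hhead, hrest⟩
    have hh := (hpt ya le_rfl hy).mp hhead
    refine ⟨⟨hh.1, ?_⟩, hh.2, ?_⟩
    · rintro x ⟨y, hy, rfl⟩
      have := PySem.List.mem_pyRange_one.mp hy
      exact ((hpt y (by omega) (by omega)).mp (hrest y hy)).1
    · rintro x ⟨y, hy, rfl⟩
      have := PySem.List.mem_pyRange_one.mp hy
      exact ((hpt y (by omega) (by omega)).mp (hrest y hy)).2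
  · rintro ⟨⟨hh1, hr1⟩, hh2, hr2⟩
    refine ⟨(hpt ya le_rfl hy).mpr ⟨hh1, hh2⟩, ?_⟩
    intro y hy'
    have hmem := PySem.List.mem_pyRange_one.mp hy'
    exact (hpt y (by omega) (by omega)).mpr
      ⟨hr1 _ ⟨y, hy', rfl⟩, hr2 _ ⟨y, hy', rfl⟩⟩

theorem altInner_eq (bnd : PySem.Dict Int (Int × Int)) (xa ya : Int) :
    ∀ (t : List (Int × Int)) (curL curR prev best : Int),
    0 ≤ best → ya ≤ prev →
    (∀ y, ya ≤ y → y ≤ prev → ((bnd.get? y).isSome : Prop)) →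
    curL = (PySem.List.pyRange (ya + 1) (prev + 1) 1).foldl
      (fun m y => max m (Lof (bnd.get? ·) y)) (Lof (bnd.get? ·) ya) →
    curR = (PySem.List.pyRange (ya + 1) (prev + 1) 1).foldl
      (fun m y => min m (Rof (bnd.get? ·) y)) (Rof (bnd.get? ·) ya) →
    (∀ q ∈ t, prev ≤ q.2) →
    t.Pairwise (fun p q => p.2 ≤ q.2) →
    altInner bnd xa ya t curL curR prev best =
      t.foldl (fun m q => max m (pg (bnd.get? ·) ((xa, ya), q))) best := by
  intro t
  induction t with
  | nil => intro curL curR prev best _ _ _ _ _ _ _; rfl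
  | cons q t ih =>
    obtain ⟨xb, yb⟩ := q
    intro curL curR prev best hbest hyaprev hpres hL hR hge hpw
    have hprevyb : prev ≤ yb := hge (xb, yb) (by simp)
    rw [List.foldl_cons]
    by_cases hall : ∀ y, prev < y → y ≤ yb → ((bnd.get? y).isSome : Prop)
    · simp only [altInner]
      rw [altExtend_some bnd yb prev curL curR hprevyb hall]
      have hpres' : ∀ y, ya ≤ y → y ≤ yb → ((bnd.get? y).isSome : Prop) := by
        intro y h1 h2
        by_cases hc : y ≤ prev
        · exact hpres y h1 hc
        · exact hall y (by omega) h2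
      have hLnew : (PySem.List.pyRange (prev + 1) (yb + 1) 1).foldl
            (fun m y => max m (Lof (bnd.get? ·) y)) curL
          = (PySem.List.pyRange (ya + 1) (yb + 1) 1).foldl
            (fun m y => max m (Lof (bnd.get? ·) y)) (Lof (bnd.get? ·) ya) := by
        rw [hL, ← List.foldl_append,
          ← PySem.List.pyRange_one_append (ya + 1) (prev + 1) (yb + 1) (by omega) (by omega)]
      have hRnew : (PySem.List.pyRange (prev + 1) (yb + 1) 1).foldl
            (fun m y => min m (Rof (bnd.get? ·) y)) curR
          = (PySem.List.pyRange (ya + 1) (yb + 1) 1).foldl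
            (fun m y => min m (Rof (bnd.get? ·) y)) (Rof (bnd.get? ·) ya) := by
        rw [hR, ← List.foldl_append,
          ← PySem.List.pyRange_one_append (ya + 1) (prev + 1) (yb + 1) (by omega) (by omega)]
      rw [show (if xa ≤ xb then (xa, xb) else (xb, xa)) = (min xa xb, max xa xb) from
        pySort2_eq xa xb]
      dsimp only
      have hv := pvalid_char (bnd.get? ·) (min xa xb) (max xa xb) ya yb (by omega) hpres'
      have hgeq : pg (bnd.get? ·) ((xa, ya), (xb, yb)) =
          (if pvalid (bnd.get? ·) (min xa xb) (max xa xb) ya yb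
           then (max xa xb - min xa xb + 1) * (yb - ya + 1) else 0) := by
        unfold pg
        dsimp only
        rw [min_eq_left (by omega : ya ≤ yb), max_eq_right (by omega : ya ≤ yb)]
      refine Eq.trans (ih _ _ yb _ ?_ (by omega) hpres' hLnew hRnew
        (fun q hq => (List.pairwise_cons.mp hpw).1 q hq)
        (List.pairwise_cons.mp hpw).2) ?_
      · split_ifs <;> omega
      · congr 1
        rw [hLnew, hRnew, ← hv, hgeq]
        exact push_eq_max best _ _ hbest (mul_pos (by omega) (by omega))
    · push Not at hall
      obtain ⟨y0, hy01, hy02, hns⟩ := hall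
      have hnone : bnd.get? y0 = none := Option.not_isSome_iff_eq_none.mp hns
      simp only [altInner]
      rw [altExtend_none bnd yb prev curL curR y0 hy01 hy02 hnone]
      have hz : ∀ q ∈ (xb, yb) :: t, pg (bnd.get? ·) ((xa, ya), q) = 0 := by
        intro q hq
        have hyq : yb ≤ q.2 := by
          rcases List.mem_cons.mp hq with h | h
          · rw [h]
          · exact (List.pairwise_cons.mp hpw).1 q h
        exact pg_zero_of_missing _ (xa, ya) q y0
          (le_trans (min_le_left _ _) (by omega))
          (le_trans (by omega : y0 ≤ q.2) (le_max_right _ _)) hnone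
      rw [fold_max_zero (fun q => pg (bnd.get? ·) ((xa, ya), q)) t _
        (le_trans hbest (le_max_left _ _)) (fun q hq => hz q (by simp [hq]))]
      rw [hz (xb, yb) (by simp), max_eq_left hbest]

theorem altOuter_eq (bnd : PySem.Dict Int (Int × Int)) :
    ∀ (l : List (Int × Int)) (best : Int), 0 ≤ best →
    l.Pairwise (fun p q => p.2 ≤ q.2) →
    altOuter bnd l best = (pairCombos l).foldl (fun m pq => max m (pg (bnd.get? ·) pq)) best := by
  intro l
  induction l with
  | nil => intro best _ _; rfl
  | cons p t ih =>
    obtain ⟨xa, ya⟩ := p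
    intro best hbest hpw
    obtain ⟨hhead, htail⟩ := List.pairwise_cons.mp hpw
    simp only [altOuter, pairCombos, List.foldl_append, List.foldl_map]
    cases hg : bnd.get? ya with
    | none =>
      rw [fold_max_zero (fun q => pg (bnd.get? ·) ((xa, ya), q)) t best hbest
        (fun q _ => pg_zero_of_missing _ (xa, ya) q ya
          (min_le_left _ _) (le_max_left _ _) hg)]
      exact ih best hbest htail
    | some b0 =>
      show altOuter bnd t (altInner bnd xa ya t b0.1 b0.2 ya best) = _
      rw [altInner_eq bnd xa ya t b0.1 b0.2 ya best hbest le_rfl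
        (fun y h1 h2 => by rw [show y = ya from le_antisymm h2 h1, hg]; simp)
        (by rw [PySem.List.pyRange_one_eq_nil (le_refl (ya + 1))]; simp [Lof, hg])
        (by rw [PySem.List.pyRange_one_eq_nil (le_refl (ya + 1))]; simp [Rof, hg])
        hhead htail]
      exact ih _ (fold_max_nonneg (fun q => pg (bnd.get? ·) ((xa, ya), q)) t best hbest) htail

-- ===== permutation step =====

theorem pg_symm (f : Int → Option (Int × Int)) (p q : Int × Int) : pg f (p, q) = pg f (q, p) := by
  simp [pg, min_comm, max_comm]

theorem pairCombos_map_perm {α : Type} (G : α × α → Int) (hsym : ∀ a b, G (a, b) = G (b, a))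
    {l l' : List α} (h : l.Perm l') :
    ((pairCombos l).map G).Perm ((pairCombos l').map G) := by
  induction h with
  | nil => exact List.Perm.refl _
  | cons x h ih =>
    simp only [pairCombos, List.map_append, List.map_map]
    exact (h.map _).append ih
  | swap x y l =>
    simp only [pairCombos, List.map_append, List.map_map, List.map_cons]
    rw [hsym y x]
    refine List.Perm.cons _ ?_
    exact List.perm_append_comm_assoc _ _ _
  | trans h1 h2 ih1 ih2 => exact ih1.trans ih2

theorem fold_max_perm (f : Int → Option (Int × Int)) {l l' : List ((Int × Int) × (Int × Int))}
    (h : (l.map (pg f)).Perm (l'.map (pg f))) (m : Int) :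
    l.foldl (fun m pq => max m (pg f pq)) m = l'.foldl (fun m pq => max m (pg f pq)) m := by
  rw [← List.foldl_map (f := pg f) (g := max), ← List.foldl_map (f := pg f) (g := max)]
  exact h.foldl_eq m

-- ===== VERDICT (by name: the statement is the Claim_ definition above) =====
theorem find_max_area_spec : Claim_equal_find_max_area := by
  intro reds ot _
  unfold Spec_find_max_area
  have hA : find_max_area reds ot =
      (pairCombos reds).foldl (fun m pq => max m (pg (lookupSpec ot) pq)) 0 := by
    show (PySem.List.combinations reds 2).foldl (fun max_area c =>
      match c with
      | [p1, p2] =>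
        let (x1, x2) := pySort2 p1.1 p2.1
        let (y1, y2) := pySort2 p1.2 p2.2
        let is_valid := aCheckRows (aRowBounds ot) x1 x2 y1 y2
        if is_valid then
          let area := (x2 - x1 + 1) * (y2 - y1 + 1)
          if area > max_area then area else max_area
        else max_area
      | _ => max_area) 0 = _
    rw [combos2_foldl _ (fun max_area (pq : (Int × Int) × (Int × Int)) =>
      let (x1, x2) := pySort2 pq.1.1 pq.2.1
      let (y1, y2) := pySort2 pq.1.2 pq.2.2
      let is_valid := aCheckRows (aRowBounds ot) x1 x2 y1 y2
      if is_valid then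
        let area := (x2 - x1 + 1) * (y2 - y1 + 1)
        if area > max_area then area else max_area
      else max_area) (fun m a b => rfl) reds 0]
    exact A_fold (lookupSpec ot) (aRowBounds ot) (LA ot) (pairCombos reds) 0 le_rfl
  have hB : find_max_area_alt reds ot =
      (pairCombos (PySem.List.sorted reds (fun p => p.2) false)).foldl
        (fun m pq => max m (pg (lookupSpec ot) pq)) 0 := by
    show altOuter (altBounds ot) (PySem.List.sorted reds (fun p => p.2) false) 0 = _
    rw [altOuter_eq (altBounds ot) (PySem.List.sorted reds (fun p => p.2) false) 0 le_rfl
      (PySem.List.sorted_pairwise reds (fun p => p.2))]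
    rw [show ((altBounds ot).get? ·) = lookupSpec ot from funext (LB ot)]
  rw [hA, hB]
  exact fold_max_perm (lookupSpec ot)
    (pairCombos_map_perm (pg (lookupSpec ot)) (fun a b => pg_symm (lookupSpec ot) a b)
      (PySem.List.sorted_perm reds (fun p => p.2) false).symm) 0
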